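-- pv_equiv track=rewrite | github.com/HKUST-KnowComp/NAACL | inference/eval_utils/evaluator.py | _determine_passage_group
-- ===== SOURCE A (Python) =====
-- def _determine_passage_group(passage_types):
--     if not passage_types:
--         return None
--
--     normalized = [p.lower() if isinstance(p, str) else "" for p in passage_types]
--     has_counterfactual = any(t == 'counterfactual' for t in normalized)
--     has_gt = any(t == 'gt_passage' for t in normalized)
--     has_consistent = any(t == 'consistent' for t in normalized)
--     only_rel_or_irrel = all(t in ['relevant', 'irrelevant'] for t in normalized)
--
--     if has_counterfactual:
--         return "counterfactual"
--     # Treat either GT passages or consistent passages as part of the "consistent" bucket.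
--     if has_consistent or has_gt:
--         return "consistent"
--     if only_rel_or_irrel:
--         return "relevant_irrelevant"
--     return None
-- ===== SOURCE B (Python) =====
-- def _determine_passage_group(passage_types):
--     if not passage_types:
--         return None
--
--     def rank(p):
--         t = p.lower() if isinstance(p, str) else ""
--         if t == 'counterfactual':
--             return 3
--         if t == 'gt_passage' or t == 'consistent':
--             return 2
--         if t == 'relevant' or t == 'irrelevant':
--             return 1
--         return 0
--
--     mx = mn = rank(passage_types[0])
--     for p in passage_types[1:]:
--         r = rank(p)
--         if r > mx:
--             mx = r
--         if r < mn:
--             mn = r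
--     if mx == 3:
--         return "counterfactual"
--     if mx == 2:
--         return "consistent"
--     if mn == 1:
--         return "relevant_irrelevant"
--     return None
-- ===== Notes on version B (the rewrite author's own statement) =====
-- stated objective: alternative
-- what changed: Replaces A's four separate scans (three any's and one all) by a per-element priority rank (counterfactual=3, consistent/gt=2, relevant/irrelevant=1, other=0) and one fold maintaining the max and min rank, reading the label off (max,min).
import Mathlib
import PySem

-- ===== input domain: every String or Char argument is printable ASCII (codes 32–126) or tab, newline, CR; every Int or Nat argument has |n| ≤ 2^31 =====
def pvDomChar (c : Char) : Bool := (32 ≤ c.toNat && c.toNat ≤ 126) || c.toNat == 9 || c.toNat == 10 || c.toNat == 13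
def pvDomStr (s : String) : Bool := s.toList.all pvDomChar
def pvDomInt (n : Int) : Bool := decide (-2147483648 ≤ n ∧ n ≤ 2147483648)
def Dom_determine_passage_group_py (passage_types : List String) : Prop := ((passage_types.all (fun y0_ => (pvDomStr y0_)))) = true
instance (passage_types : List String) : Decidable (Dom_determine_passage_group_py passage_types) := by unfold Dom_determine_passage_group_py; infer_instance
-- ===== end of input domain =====

-- B replaces A's four list scans by a per-element priority rank and a single max/min fold (alternative decomposition, same cost).


-- ===== PORT A =====
def determine_passage_group_py (passage_types : List String) : Option String :=
  if passage_types = [] then none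
  else
    let normalized := passage_types.map (fun p => PySem.Str.lower p)
    let has_counterfactual := normalized.any (fun t => t == "counterfactual")
    let has_gt := normalized.any (fun t => t == "gt_passage")
    let has_consistent := normalized.any (fun t => t == "consistent")
    let only_rel_or_irrel := normalized.all (fun t => ["relevant", "irrelevant"].contains t)
    if has_counterfactual then some "counterfactual"
    else if has_consistent || has_gt then some "consistent"
    else if only_rel_or_irrel then some "relevant_irrelevant"
    else none

-- ===== PORT B =====
def pvRank (p : String) : Int :=
  if PySem.Str.lower p == "counterfactual" then 3
  else if PySem.Str.lower p == "gt_passage" || PySem.Str.lower p == "consistent" then 2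
  else if PySem.Str.lower p == "relevant" || PySem.Str.lower p == "irrelevant" then 1
  else 0

def determine_passage_group_py_alt (passage_types : List String) : Option String :=
  match passage_types with
  | [] => none
  | p :: rest =>
    let r0 := pvRank p
    let mm := rest.foldl
      (fun (acc : Int × Int) q =>
        let r := pvRank q
        ((if r > acc.1 then r else acc.1), (if r < acc.2 then r else acc.2)))
      (r0, r0)
    if mm.1 == 3 then some "counterfactual"
    else if mm.1 == 2 then some "consistent"
    else if mm.2 == 1 then some "relevant_irrelevant"
    else none

-- ===== PRECONDITION & SPEC =====
def Spec_determine_passage_group_py (passage_types : List String) (out : Option String) : Prop := out = determine_passage_group_py_alt passage_types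
instance (passage_types : List String) (out : Option String) : Decidable (Spec_determine_passage_group_py passage_types out) := by unfold Spec_determine_passage_group_py; infer_instance

-- ===== CLAIM (what is proved, stated in full; the proofs are below) =====
def Claim_equal_determine_passage_group_py : Prop := ∀ (passage_types : List String), Dom_determine_passage_group_py passage_types → Spec_determine_passage_group_py passage_types (determine_passage_group_py passage_types)

-- ===== LEMMAS AND PROOFS =====

theorem pvRank_nonneg (p : String) : 0 ≤ pvRank p := by
  unfold pvRank; split_ifs <;> norm_num

theorem pvRank_le_three (p : String) : pvRank p ≤ 3 := by
  unfold pvRank; split_ifs <;> norm_num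

theorem pvRank_eq_three (p : String) :
    pvRank p = 3 ↔ PySem.Str.lower p = "counterfactual" := by
  unfold pvRank; split_ifs with h1 h2 h3 <;> simp_all

theorem pvRank_eq_two (p : String) :
    pvRank p = 2 ↔ (PySem.Str.lower p = "gt_passage" ∨ PySem.Str.lower p = "consistent") := by
  unfold pvRank; split_ifs with h1 h2 h3 <;> simp_all

theorem pvRank_eq_one (p : String) :
    pvRank p = 1 ↔ (PySem.Str.lower p = "relevant" ∨ PySem.Str.lower p = "irrelevant") := by
  unfold pvRank; split_ifs with h1 h2 h3
  · simp only [beq_iff_eq] at h1; rw [h1]; decide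
  · simp only [beq_iff_eq, Bool.or_eq_true] at h2
    rcases h2 with h | h <;> rw [h] <;> decide
  · simp only [beq_iff_eq, Bool.or_eq_true] at h3
    simp [h3]
  · simp only [beq_iff_eq, Bool.or_eq_true] at h3
    simp_all

-- the fold computes the componentwise max and min of the ranks
theorem pvFold_eq (rest : List String) (a b : Int) :
    rest.foldl
      (fun (acc : Int × Int) q =>
        let r := pvRank q
        ((if r > acc.1 then r else acc.1), (if r < acc.2 then r else acc.2)))
      (a, b)
    = (rest.foldl (fun m q => max m (pvRank q)) a,
       rest.foldl (fun m q => min m (pvRank q)) b) := by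
  induction rest generalizing a b with
  | nil => rfl
  | cons q l ih =>
    simp only [List.foldl_cons]
    rw [ih]
    have h1 : (if pvRank q > a then pvRank q else a) = max a (pvRank q) := by omega
    have h2 : (if pvRank q < b then pvRank q else b) = min b (pvRank q) := by omega
    rw [h1, h2]

theorem pvFoldMax_le (rest : List String) (a c : Int) :
    rest.foldl (fun m q => max m (pvRank q)) a ≤ c ↔ a ≤ c ∧ ∀ q ∈ rest, pvRank q ≤ c := by
  induction rest generalizing a with
  | nil => simp
  | cons q l ih =>
    simp only [List.foldl_cons, ih, List.mem_cons]
    constructor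
    · rintro ⟨h1, h2⟩
      exact ⟨by omega, fun x hx => by rcases hx with rfl | hx; omega; exact h2 x hx⟩
    · rintro ⟨h1, h2⟩
      exact ⟨by have := h2 q (Or.inl rfl); omega, fun x hx => h2 x (Or.inr hx)⟩

theorem pvFoldMin_le_iff (rest : List String) (a c : Int) :
    c ≤ rest.foldl (fun m q => min m (pvRank q)) a ↔ c ≤ a ∧ ∀ q ∈ rest, c ≤ pvRank q := by
  induction rest generalizing a with
  | nil => simp
  | cons q l ih =>
    simp only [List.foldl_cons, ih, List.mem_cons]
    constructor
    · rintro ⟨h1, h2⟩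
      exact ⟨by omega, fun x hx => by rcases hx with rfl | hx; omega; exact h2 x hx⟩
    · rintro ⟨h1, h2⟩
      exact ⟨by have := h2 q (Or.inl rfl); omega, fun x hx => h2 x (Or.inr hx)⟩

theorem pvFoldMax_attained (rest : List String) (a : Int) :
    rest.foldl (fun m q => max m (pvRank q)) a = a ∨
      ∃ q ∈ rest, rest.foldl (fun m q => max m (pvRank q)) a = pvRank q := by
  induction rest generalizing a with
  | nil => simp
  | cons q l ih =>
    simp only [List.foldl_cons, List.mem_cons]
    rcases ih (max a (pvRank q)) with h | ⟨x, hx, hr⟩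
    · rcases max_choice a (pvRank q) with hm | hm
      · exact Or.inl (h.trans hm)
      · exact Or.inr ⟨q, Or.inl rfl, h.trans hm⟩
    · exact Or.inr ⟨x, Or.inr hx, hr⟩

-- ===== VERDICT (by name: the statement is the Claim_ definition above) =====
theorem determine_passage_group_py_spec : Claim_equal_determine_passage_group_py := by
  unfold Claim_equal_determine_passage_group_py
  intro pts _
  unfold Spec_determine_passage_group_py
  match pts with
  | [] => rfl
  | p :: rest =>
    simp only [determine_passage_group_py, determine_passage_group_py_alt, pvFold_eq]
    set mx := rest.foldl (fun m q => max m (pvRank q)) (pvRank p) with hmx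
    set mn := rest.foldl (fun m q => min m (pvRank q)) (pvRank p) with hmn
    have hub : pvRank p ≤ mx ∧ ∀ q ∈ rest, pvRank q ≤ mx :=
      (pvFoldMax_le rest (pvRank p) mx).mp le_rfl
    have hlb : mn ≤ pvRank p ∧ ∀ q ∈ rest, mn ≤ pvRank q :=
      (pvFoldMin_le_iff rest (pvRank p) mn).mp le_rfl
    have hmxmem : ∃ q ∈ p :: rest, mx = pvRank q := by
      rcases pvFoldMax_attained rest (pvRank p) with h | ⟨q, hq, hr⟩
      · exact ⟨p, List.mem_cons_self, h⟩
      · exact ⟨q, List.mem_cons_of_mem _ hq, hr⟩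
    have hle3 : mx ≤ 3 := by
      obtain ⟨q, hq, hr⟩ := hmxmem
      have := pvRank_le_three q; omega
    by_cases hC : ∃ q ∈ p :: rest, PySem.Str.lower q = "counterfactual"
    · have h3 : mx = 3 := by
        obtain ⟨q, hq, hql⟩ := hC
        have hr := (pvRank_eq_three q).mpr hql
        rcases List.mem_cons.mp hq with rfl | hq
        · have := hub.1; omega
        · have := hub.2 q hq; omega
      simp only [List.map_cons, List.any_cons]
      simp [h3]
      intro h1 h2
      rcases hC with ⟨q, hq, hql⟩
      rcases List.mem_cons.mp hq with rfl | hq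
      · exact absurd hql h1
      · exact absurd hql (h2 q hq)
    · have hno3 : ∀ q ∈ p :: rest, pvRank q ≠ 3 := fun q hq h =>
        hC ⟨q, hq, (pvRank_eq_three q).mp h⟩
      have hmx2 : mx ≤ 2 := by
        obtain ⟨q, hq, hr⟩ := hmxmem
        have := pvRank_le_three q
        have := hno3 q hq
        omega
      by_cases hG : ∃ q ∈ p :: rest,
          PySem.Str.lower q = "consistent" ∨ PySem.Str.lower q = "gt_passage"
      · have h2 : mx = 2 := by
          obtain ⟨q, hq, hql⟩ := hG
          have hr : pvRank q = 2 := (pvRank_eq_two q).mpr (by tauto)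
          rcases List.mem_cons.mp hq with rfl | hq
          · have := hub.1; omega
          · have := hub.2 q hq; omega
        have hCp : ¬(PySem.Str.lower p = "counterfactual" ∨
            ∃ x ∈ rest, PySem.Str.lower x = "counterfactual") := by
          rintro (h | ⟨x, hx, h⟩)
          · exact hC ⟨p, List.mem_cons_self, h⟩
          · exact hC ⟨x, List.mem_cons_of_mem _ hx, h⟩
        have hGp : (PySem.Str.lower p = "consistent" ∨
              ∃ x ∈ rest, PySem.Str.lower x = "consistent") ∨
            (PySem.Str.lower p = "gt_passage" ∨
              ∃ x ∈ rest, PySem.Str.lower x = "gt_passage") := by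
          obtain ⟨q, hq, h | h⟩ := hG <;> rcases List.mem_cons.mp hq with rfl | hq'
          · exact Or.inl (Or.inl h)
          · exact Or.inl (Or.inr ⟨q, hq', h⟩)
          · exact Or.inr (Or.inl h)
          · exact Or.inr (Or.inr ⟨q, hq', h⟩)
        simp [h2]
        rw [if_neg hCp, if_pos hGp]
      · have hno2 : ∀ q ∈ p :: rest, pvRank q ≠ 2 := fun q hq h =>
          hG ⟨q, hq, ((pvRank_eq_two q).mp h).symm.imp id id |>.symm.elim
            (fun h' => Or.inr h') (fun h' => Or.inl h')⟩
        have hmx1 : mx ≤ 1 := by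
          obtain ⟨q, hq, hr⟩ := hmxmem
          have := hno3 q hq
          have := hno2 q hq
          have := pvRank_le_three q
          omega
        by_cases hA : ∀ q ∈ p :: rest,
            PySem.Str.lower q = "relevant" ∨ PySem.Str.lower q = "irrelevant"
        · have hall1 : ∀ q ∈ p :: rest, pvRank q = 1 := fun q hq =>
            (pvRank_eq_one q).mpr (hA q hq)
          have hmn1 : mn = 1 := by
            have h1 : 1 ≤ mn := by
              rw [hmn, pvFoldMin_le_iff]
              exact ⟨by have := hall1 p List.mem_cons_self; omega,
                     fun q hq => by have := hall1 q (List.mem_cons_of_mem _ hq); omega⟩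
            have := hlb.1
            have := hall1 p List.mem_cons_self
            omega
          have hCp : ¬(PySem.Str.lower p = "counterfactual" ∨
              ∃ x ∈ rest, PySem.Str.lower x = "counterfactual") := by
            rintro (h | ⟨x, hx, h⟩)
            · exact hC ⟨p, List.mem_cons_self, h⟩
            · exact hC ⟨x, List.mem_cons_of_mem _ hx, h⟩
          have hGp : ¬((PySem.Str.lower p = "consistent" ∨
                ∃ x ∈ rest, PySem.Str.lower x = "consistent") ∨
              (PySem.Str.lower p = "gt_passage" ∨
                ∃ x ∈ rest, PySem.Str.lower x = "gt_passage")) := by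
            rintro ((h | ⟨x, hx, h⟩) | (h | ⟨x, hx, h⟩))
            · exact hG ⟨p, List.mem_cons_self, Or.inl h⟩
            · exact hG ⟨x, List.mem_cons_of_mem _ hx, Or.inl h⟩
            · exact hG ⟨p, List.mem_cons_self, Or.inr h⟩
            · exact hG ⟨x, List.mem_cons_of_mem _ hx, Or.inr h⟩
          have hAp : (PySem.Str.lower p = "relevant" ∨ PySem.Str.lower p = "irrelevant") ∧
              ∀ x ∈ rest, PySem.Str.lower x = "relevant" ∨ PySem.Str.lower x = "irrelevant" :=
            ⟨hA p List.mem_cons_self, fun x hx => hA x (List.mem_cons_of_mem _ hx)⟩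
          simp [hmn1, show mx ≠ 3 by omega, show mx ≠ 2 by omega]
          rw [if_neg hCp, if_neg hGp, if_pos hAp]
        · have : ∃ q ∈ p :: rest, pvRank q ≠ 1 := by
            by_contra h
            push Not at h
            exact hA fun q hq => (pvRank_eq_one q).mp (h q hq)
          obtain ⟨q, hq, hq1⟩ := this
          have hq0 : pvRank q = 0 := by
            have := hno3 q hq
            have := hno2 q hq
            have h1 : pvRank q ≤ mx := by
              rcases List.mem_cons.mp hq with rfl | hq'
              · exact hub.1
              · exact hub.2 q hq'
            have := pvRank_nonneg q
            omega
          have hmn0 : mn ≤ 0 := by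
            rcases List.mem_cons.mp hq with rfl | hq'
            · have := hlb.1; omega
            · have := hlb.2 q hq'; omega
          have hCp : ¬(PySem.Str.lower p = "counterfactual" ∨
              ∃ x ∈ rest, PySem.Str.lower x = "counterfactual") := by
            rintro (h | ⟨x, hx, h⟩)
            · exact hC ⟨p, List.mem_cons_self, h⟩
            · exact hC ⟨x, List.mem_cons_of_mem _ hx, h⟩
          have hGp : ¬((PySem.Str.lower p = "consistent" ∨
                ∃ x ∈ rest, PySem.Str.lower x = "consistent") ∨
              (PySem.Str.lower p = "gt_passage" ∨
                ∃ x ∈ rest, PySem.Str.lower x = "gt_passage")) := by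
            rintro ((h | ⟨x, hx, h⟩) | (h | ⟨x, hx, h⟩))
            · exact hG ⟨p, List.mem_cons_self, Or.inl h⟩
            · exact hG ⟨x, List.mem_cons_of_mem _ hx, Or.inl h⟩
            · exact hG ⟨p, List.mem_cons_self, Or.inr h⟩
            · exact hG ⟨x, List.mem_cons_of_mem _ hx, Or.inr h⟩
          have hAp : ¬((PySem.Str.lower p = "relevant" ∨ PySem.Str.lower p = "irrelevant") ∧
              ∀ x ∈ rest, PySem.Str.lower x = "relevant" ∨ PySem.Str.lower x = "irrelevant") := by
            rintro ⟨h1, h2⟩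
            refine hA fun x hx => ?_
            rcases List.mem_cons.mp hx with rfl | hx'
            · exact h1
            · exact h2 x hx'
          simp [show mx ≠ 3 by omega, show mx ≠ 2 by omega, show mn ≠ 1 by omega]
          rw [if_neg hCp, if_neg hGp, if_neg hAp]
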